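-- pv_equiv track=rewrite | github.com/hossainmd-uc/tip-103 | Unit2PS.py | can_make_balanced
-- ===== SOURCE A (Python) =====
-- def can_make_balanced(code):
--     if not code:
--         return False
--     if len(code) in [1, 2, 3]:
--         return True
--
--     l_map = dict()
--     for letter in code:
--         if letter not in l_map:
--             l_map[letter] = 1
--         else:
--             l_map[letter] += 1
--
--     num_freq = dict()
--     for num in l_map.values():
--         if num not in num_freq:
--             num_freq[num] = 1
--         else:
--             num_freq[num] += 1
--
--     l = sorted(list(num_freq.items()))
--     if len(num_freq) > 2:
--         return False
--     elif len(num_freq) == 2: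
--         # case: lower frequency is a single letter that occurs once -> True
--         # case: higher frequency is 1 frequency away and only appears once -> True
--
--         if l[0][0] == 1 and l[0][1] == 1:
--             return True
--         if l[1][0] == l[0][0] + 1 and l[1][1] == 1:
--             return True
--     else:
--         if l[0][0] == 1 or l[0][1] == 1:
--             return True
--     return False
-- ===== SOURCE B (Python) =====
-- def can_make_balanced(code):
--     if not code:
--         return False
--     counts = {}
--     for ch in code:
--         counts[ch] = counts.get(ch, 0) + 1
--     for ch in counts:
--         remaining = [v - 1 if c == ch else v for c, v in counts.items()]
--         remaining = [v for v in remaining if v > 0]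
--         if len(set(remaining)) <= 1:
--             return True
--     return False
-- ===== Notes on version B (the rewrite author's own statement) =====
-- stated objective: simpler
-- what changed: B replaces A's frequency-of-frequencies dict, its sorted two-element case analysis and the hard-coded length-1/2/3 shortcut by directly simulating the removal of one occurrence of each distinct character and checking that the remaining positive counts are all equal.
import Mathlib
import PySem

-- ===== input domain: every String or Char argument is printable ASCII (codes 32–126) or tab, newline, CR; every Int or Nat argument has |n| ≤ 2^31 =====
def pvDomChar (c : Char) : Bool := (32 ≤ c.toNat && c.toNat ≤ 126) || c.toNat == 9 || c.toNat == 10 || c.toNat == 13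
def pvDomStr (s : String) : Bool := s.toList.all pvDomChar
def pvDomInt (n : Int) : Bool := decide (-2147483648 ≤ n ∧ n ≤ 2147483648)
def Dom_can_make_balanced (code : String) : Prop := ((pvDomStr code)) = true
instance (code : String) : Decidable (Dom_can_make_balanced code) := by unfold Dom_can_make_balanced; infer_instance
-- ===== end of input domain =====

-- B replaces A's frequency-of-frequencies dict and its sorted-pair case analysis by directly
-- simulating the removal of one occurrence of each distinct character (objective: simpler).


-- ===== PORT A =====
def can_make_balanced (code : String) : Bool :=
  let cs := code.toList
  if cs = [] then false                                              -- if not code: return False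
  else if cs.length = 1 ∨ cs.length = 2 ∨ cs.length = 3 then true    -- if len(code) in [1, 2, 3]
  else
    let l_map := cs.foldl (fun d letter =>                           -- for letter in code: …
      if d.contains letter = false then d.insert letter 1
      else d.modify letter 0 (· + 1)) (PySem.Dict.empty : PySem.Dict Char Int)
    let num_freq := l_map.values.foldl (fun d num =>                 -- for num in l_map.values(): …
      if d.contains num = false then d.insert num 1
      else d.modify num 0 (· + 1)) (PySem.Dict.empty : PySem.Dict Int Int)
    let l := PySem.List.sorted2 num_freq.items (fun p => p.1) (fun p => p.2)
    if num_freq.size > 2 then false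
    else if num_freq.size = 2 then
      -- l[0] and l[1]: both indices provably in range here (num_freq has exactly 2 items)
      let p0 := PySem.List.pyGetD l 0 ((0 : Int), (0 : Int))
      let p1 := PySem.List.pyGetD l 1 ((0 : Int), (0 : Int))
      if p0.1 = 1 ∧ p0.2 = 1 then true
      else if p1.1 = p0.1 + 1 ∧ p1.2 = 1 then true
      else false
    else
      -- l[0]: index provably in range here (num_freq is nonempty)
      let p0 := PySem.List.pyGetD l 0 ((0 : Int), (0 : Int))
      if p0.1 = 1 ∨ p0.2 = 1 then true
      else false

-- ===== PORT B =====
def can_make_balanced_alt (code : String) : Bool :=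
  let cs := code.toList
  if cs = [] then false
  else
    let counts := cs.foldl (fun d ch => d.insert ch (d.getD ch 0 + 1))
      (PySem.Dict.empty : PySem.Dict Char Int)                       -- counts[ch] = counts.get(ch, 0) + 1
    counts.keys.any (fun ch =>                                       -- for ch in counts: … return True / return False
      let remaining := counts.items.map (fun p => if p.1 = ch then p.2 - 1 else p.2)
      let remaining := remaining.filter (fun v => decide (0 < v))
      decide ((PySem.Set.ofList remaining).length ≤ 1))              -- len(set(remaining)) <= 1

-- ===== PRECONDITION & SPEC =====
def Spec_can_make_balanced (code : String) (out : Bool) : Prop := out = can_make_balanced_alt code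
instance (code : String) (out : Bool) : Decidable (Spec_can_make_balanced code out) := by unfold Spec_can_make_balanced; infer_instance

-- ===== CLAIM (what is proved, stated in full; the proofs are below) =====
def Claim_equal_can_make_balanced : Prop := ∀ (code : String), Dom_can_make_balanced code → Spec_can_make_balanced code (can_make_balanced code)

-- ===== LEMMAS AND PROOFS =====

-- Both of A's counting loops, and B's counting loop, build collections.Counter of their input.
lemma pvCountStep_eq {κ : Type} [BEq κ] [LawfulBEq κ] (d : PySem.Dict κ Int) (c : κ) :
    (if d.contains c = false then d.insert c 1 else d.modify c 0 (· + 1)) = d.insert c (d.getD c 0 + 1) := by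
  by_cases h : d.contains c = true
  · simp [h, PySem.Dict.modify]
  · have h' : d.contains c = false := by simpa using h
    rw [PySem.Dict.getD_of_not_contains d (0 : Int) h']
    simp [h']

lemma pvCountFold_eq {κ : Type} [BEq κ] [LawfulBEq κ] (xs : List κ) :
    xs.foldl (fun d c => if d.contains c = false then d.insert c 1 else d.modify c 0 (· + 1))
      PySem.Dict.empty = PySem.Dict.counter xs := by
  have h : (fun (d : PySem.Dict κ Int) c => if d.contains c = false then d.insert c 1 else d.modify c 0 (· + 1))
      = fun d c => d.insert c (d.getD c 0 + 1) := by
    funext d c; exact pvCountStep_eq d c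
  rw [h, PySem.Dict.foldl_insert_getD_add_one_eq_counter]

-- small generic list facts
lemma pvTwoMemLen {α : Type} (l : List α) (a b : α) (ha : a ∈ l) (hb : b ∈ l) (hab : a ≠ b) :
    2 ≤ l.length := by
  match l, ha with
  | [x], ha => simp_all
  | x :: y :: t, _ => simp [List.length]

lemma pvCountPNot {α : Type} (l : List α) (p : α → Bool) :
    l.countP p + l.countP (fun a => !p a) = l.length := by
  induction l with
  | nil => simp
  | cons x t ih =>
    by_cases h : p x = true
    · simp [h]; omega
    · have h' : p x = false := by simpa using h
      simp [h']; omega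

-- distinct keys cannot have their counts add up beyond the list length
lemma pvCountsSumLe (cs : List Char) (ks : List Char) (hnd : ks.Nodup) :
    (ks.map (fun k => cs.count k)).sum ≤ cs.length := by
  induction ks generalizing cs with
  | nil => simp
  | cons k t ih =>
    have hnd' : t.Nodup := hnd.of_cons
    have hkt : k ∉ t := by simp_all [List.nodup_cons]
    have hmap : t.map (fun k' => cs.count k') = t.map (fun k' => (cs.filter (fun a => !(a == k))).count k') := by
      apply List.map_congr_left
      intro k' hk'
      have hne : (k' == k) = false := by
        simp only [beq_eq_false_iff_ne]; rintro rfl; exact hkt hk'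
      rw [List.count_filter]
      simp [hne]
    have hlen : cs.count k + (cs.filter (fun a => !(a == k))).length = cs.length := by
      rw [List.count, ← List.countP_eq_length_filter]
      exact pvCountPNot cs _
    have := ih (cs.filter (fun a => !(a == k)))  hnd'
    simp only [List.map_cons, List.sum_cons]
    rw [hmap] at *
    omega

lemma pvNodupLenLeOne {α : Type} (l : List α) (hnd : l.Nodup) :
    l.length ≤ 1 ↔ ∀ a ∈ l, ∀ b ∈ l, a = b := by
  constructor
  · intro h a ha b hb
    match l, ha with
    | [x], ha => simp_all
    | x :: y :: t, _ => simp at h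
  · intro h
    match l with
    | [] => simp
    | [x] => simp
    | x :: y :: t =>
      exfalso
      have hxy : x ≠ y := by
        have := hnd
        simp [List.nodup_cons] at this
        tauto
      exact hxy (h x (by simp) y (by simp))

-- len(set(w)) <= 1 says exactly that all elements of w are equal
lemma pvSetLenLeOne (w : List Int) :
    (PySem.Set.ofList w).length ≤ 1 ↔ ∀ a ∈ w, ∀ b ∈ w, a = b := by
  rw [pvNodupLenLeOne _ (PySem.Set.nodup_ofList w)]
  constructor
  · intro h a ha b hb
    exact h a (by rw [PySem.Set.mem_ofList]; exact ha) b (by rw [PySem.Set.mem_ofList]; exact hb)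
  · intro h a ha b hb
    exact h a ((PySem.Set.mem_ofList _ _).mp ha) b ((PySem.Set.mem_ofList _ _).mp hb)

lemma pvFilterNeLen {α : Type} [DecidableEq α] (l : List α) (hnd : l.Nodup) (a : α) :
    l.length ≤ (l.filter (fun b => b ≠ a)).length + 1 := by
  have h1 : l.countP (fun b => b == a) ≤ 1 := by
    have := List.nodup_iff_count_le_one.mp hnd a
    simpa [List.count] using this
  have h2 := pvCountPNot l (fun b => b == a)
  have hpe : (fun b => decide (b ≠ a)) = (fun b : α => !(b == a)) := by
    funext b; by_cases hb : b = a <;> simp [hb]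
  have h3 : (l.filter (fun b => b ≠ a)).length = l.countP (fun b => !(b == a)) := by
    rw [List.countP_eq_length_filter, hpe]
  omega

lemma pvOneAvoid {α : Type} [DecidableEq α] (l : List α) (hnd : l.Nodup) (h2 : 2 ≤ l.length) (a : α) :
    ∃ b ∈ l, b ≠ a := by
  have hlen := pvFilterNeLen l hnd a
  set t := l.filter (fun b => b ≠ a) with ht
  have h1 : 1 ≤ t.length := by omega
  match t, h1, ht with
  | b :: t', _, ht =>
    have hb : b ∈ l.filter (fun b => b ≠ a) := by rw [← ht]; simp
    simp only [List.mem_filter] at hb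
    exact ⟨b, hb.1, by simpa using hb.2⟩

lemma pvTwoAvoid {α : Type} [DecidableEq α] (l : List α) (hnd : l.Nodup) (h3 : 3 ≤ l.length) (a : α) :
    ∃ b ∈ l, ∃ c ∈ l, b ≠ c ∧ b ≠ a ∧ c ≠ a := by
  have hlen := pvFilterNeLen l hnd a
  have hndt : (l.filter (fun b => b ≠ a)).Nodup := hnd.filter _
  set t := l.filter (fun b => b ≠ a) with ht
  have h2 : 2 ≤ t.length := by omega
  match t, h2, hndt, ht with
  | b :: c :: t', _, hndt, ht =>
    have hb : b ∈ l.filter (fun b => b ≠ a) := by rw [← ht]; simp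
    have hc : c ∈ l.filter (fun b => b ≠ a) := by rw [← ht]; simp
    simp only [List.mem_filter] at hb hc
    have hbc : b ≠ c := by
      intro hE; rw [List.nodup_cons] at hndt; simp [hE] at hndt
    exact ⟨b, hb.1, c, hc.1, hbc, by simpa using hb.2, by simpa using hc.2⟩

lemma pvCountMap (S : List Char) (f : Char → Int) (n : Int) :
    (S.map f).count n = S.countP (fun k => f k == n) := by
  simp [List.count, List.countP_map]; rfl

-- the proposition B's loop decides: some single-occurrence removal leaves all counts equal
def pvUni (w : List Int) : Prop := ∀ a ∈ w, ∀ b ∈ w, a = b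

def pvBlist (S : List Char) (f : Char → Int) (ch : Char) : List Int :=
  (S.map (fun k => if k = ch then f k - 1 else f k)).filter (fun v => decide (0 < v))

def pvBP (S : List Char) (f : Char → Int) : Prop := ∃ ch ∈ S, pvUni (pvBlist S f ch)

lemma pvMemBlist (S : List Char) (f : Char → Int) (ch : Char) (hch : ch ∈ S) (x : Int) :
    x ∈ pvBlist S f ch ↔ 0 < x ∧ (x = f ch - 1 ∨ ∃ k ∈ S, k ≠ ch ∧ f k = x) := by
  simp only [pvBlist, List.mem_filter, List.mem_map, decide_eq_true_eq]
  constructor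
  · rintro ⟨⟨k, hk, hkx⟩, hpos⟩
    refine ⟨hpos, ?_⟩
    by_cases hkch : k = ch
    · subst hkch; simp at hkx; left; omega
    · right; exact ⟨k, hk, hkch, by simpa [hkch] using hkx⟩
  · rintro ⟨hpos, h | ⟨k, hk, hkch, hkx⟩⟩
    · exact ⟨⟨ch, hch, by simp [h]⟩, hpos⟩
    · exact ⟨⟨k, hk, by simp [hkch, hkx]⟩, hpos⟩

-- B's port computes exactly pvBP over the distinct characters and their counts
lemma pvB_iff (code : String) (h : code.toList ≠ []) :
    (can_make_balanced_alt code = true) ↔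
      pvBP (PySem.Set.ofList code.toList) (fun k => (code.toList.count k : Int)) := by
  unfold can_make_balanced_alt
  simp only [h, if_false, PySem.Dict.foldl_insert_getD_add_one_eq_counter,
    PySem.Dict.keys_counter, PySem.Dict.items_counter, List.any_eq_true, decide_eq_true_eq]
  unfold pvBP
  refine exists_congr fun ch => and_congr_right fun hch => ?_
  rw [List.map_map]
  have hcomp : ((fun p : Char × Int => if p.1 = ch then p.2 - 1 else p.2) ∘
      (fun k => (k, (code.toList.count k : Int)))) =
      fun k => if k = ch then (code.toList.count k : Int) - 1 else (code.toList.count k : Int) := rfl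
  rw [hcomp, pvSetLenLeOne]
  rfl

-- values of f are in the value set, and value-set members are attained
lemma pvAtt (S : List Char) (f : Char → Int) (n : Int)
    (hn : n ∈ PySem.Set.ofList (S.map f)) : ∃ k ∈ S, f k = n := by
  rw [PySem.Set.mem_ofList, List.mem_map] at hn
  obtain ⟨k, hk, hkn⟩ := hn
  exact ⟨k, hk, hkn⟩

lemma pvVal (S : List Char) (f : Char → Int) (k : Char) (hk : k ∈ S) :
    f k ∈ PySem.Set.ofList (S.map f) := by
  rw [PySem.Set.mem_ofList]
  exact List.mem_map_of_mem hk

-- a value held by exactly one key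
lemma pvCntOne (S : List Char) (f : Char → Int) (n : Int) (ch : Char)
    (hch : ch ∈ S) (hfch : f ch = n) (hc : S.countP (fun k => f k == n) ≤ 1) :
    ∀ k ∈ S, k ≠ ch → f k ≠ n := by
  intro k hk hkch hkn
  have h1 : k ∈ S.filter (fun k => f k == n) := by simp [List.mem_filter, hk, hkn]
  have h2 : ch ∈ S.filter (fun k => f k == n) := by simp [List.mem_filter, hch, hfch]
  have := pvTwoMemLen _ k ch h1 h2 hkch
  rw [← List.countP_eq_length_filter] at this
  omega

-- a value held by at least two keys is held by a key different from any given one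
lemma pvCntTwo (S : List Char) (f : Char → Int) (n : Int) (hnd : S.Nodup)
    (hc : 2 ≤ S.countP (fun k => f k == n)) (ch : Char) :
    ∃ k ∈ S, k ≠ ch ∧ f k = n := by
  rw [List.countP_eq_length_filter] at hc
  have hndf : (S.filter (fun k => f k == n)).Nodup := hnd.filter _
  set t := S.filter (fun k => f k == n) with hT
  match t, hc, hndf, hT with
  | k1 :: k2 :: t', _, hndf, hT =>
    have hk1 : k1 ∈ S.filter (fun k => f k == n) := by rw [← hT]; simp
    have hk2 : k2 ∈ S.filter (fun k => f k == n) := by rw [← hT]; simp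
    simp only [List.mem_filter, beq_iff_eq] at hk1 hk2
    have h12 : k1 ≠ k2 := by
      rw [List.nodup_cons] at hndf; simp at hndf; tauto
    by_cases h : k1 = ch
    · exact ⟨k2, hk2.1, by rw [← h]; exact h12.symm, hk2.2⟩
    · exact ⟨k1, hk1.1, h, hk1.2⟩

-- three or more distinct counts: no single removal balances
lemma pvC3 (S : List Char) (f : Char → Int) (_hnd : S.Nodup) (hf : ∀ k ∈ S, 1 ≤ f k)
    (h3 : 3 ≤ (PySem.Set.ofList (S.map f)).length) : ¬ pvBP S f := by
  rintro ⟨ch, hch, huni⟩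
  obtain ⟨b, hbF, c, hcF, hbc, hba, hca⟩ :=
    pvTwoAvoid _ (PySem.Set.nodup_ofList (S.map f)) h3 (f ch)
  obtain ⟨kb, hkb, hkbv⟩ := pvAtt S f b hbF
  obtain ⟨kc, hkc, hkcv⟩ := pvAtt S f c hcF
  have hbpos : 1 ≤ b := hkbv ▸ hf kb hkb
  have hcpos : 1 ≤ c := hkcv ▸ hf kc hkc
  have hbmem : b ∈ pvBlist S f ch := by
    rw [pvMemBlist S f ch hch]
    exact ⟨by omega, Or.inr ⟨kb, hkb, fun hE => hba (by rw [← hkbv, hE]), hkbv⟩⟩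
  have hcmem : c ∈ pvBlist S f ch := by
    rw [pvMemBlist S f ch hch]
    exact ⟨by omega, Or.inr ⟨kc, hkc, fun hE => hca (by rw [← hkcv, hE]), hkcv⟩⟩
  exact hbc (huni b hbmem c hcmem)

-- a single distinct count a: balanced-by-one-removal iff a = 1 or only one key
lemma pvC1 (S : List Char) (f : Char → Int) (hnd : S.Nodup) (hS : S ≠ []) (hf : ∀ k ∈ S, 1 ≤ f k)
    (a : Int) (hF : PySem.Set.ofList (S.map f) = [a]) :
    pvBP S f ↔ (a = 1 ∨ S.length = 1) := by
  have hall : ∀ k ∈ S, f k = a := by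
    intro k hk
    have := pvVal S f k hk
    rw [hF] at this
    simpa using this
  have ha1 : 1 ≤ a := by
    have haF : a ∈ PySem.Set.ofList (S.map f) := by rw [hF]; simp
    obtain ⟨k, hk, hkv⟩ := pvAtt S f a haF
    exact hkv ▸ hf k hk
  constructor
  · rintro ⟨ch, hch, huni⟩
    by_contra hcon
    rcases not_or.mp hcon with ⟨hna, hnl⟩
    have hlen2 : 2 ≤ S.length := by
      have : S.length ≠ 0 := by simpa [List.length_eq_zero_iff] using hS
      omega
    have ha2 : 2 ≤ a := by omega
    have hm1 : a - 1 ∈ pvBlist S f ch := by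
      rw [pvMemBlist S f ch hch]
      exact ⟨by omega, Or.inl (by rw [hall ch hch])⟩
    obtain ⟨k, hk, hkch⟩ := pvOneAvoid S hnd hlen2 ch
    have hm2 : a ∈ pvBlist S f ch := by
      rw [pvMemBlist S f ch hch]
      exact ⟨by omega, Or.inr ⟨k, hk, hkch, hall k hk⟩⟩
    have := huni _ hm1 _ hm2
    omega
  · rintro (ha | hl)
    · match S, hS with
      | ch :: S', _ =>
        refine ⟨ch, by simp, ?_⟩
        intro u hu v hv
        rw [pvMemBlist _ f ch (by simp)] at hu hv
        have h1 : ∀ w : Int, 0 < w →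
            (w = f ch - 1 ∨ ∃ k ∈ ch :: S', k ≠ ch ∧ f k = w) → w = 1 := by
          rintro w hw (hE | ⟨k, hk, hkch, hkv⟩)
          · rw [hall ch (by simp), ha] at hE; omega
          · rw [← hkv, hall k hk, ha]
        rw [h1 u hu.1 hu.2, h1 v hv.1 hv.2]
    · match S, hl with
      | [ch], _ =>
        refine ⟨ch, by simp, ?_⟩
        intro u hu v hv
        rw [pvMemBlist _ f ch (by simp)] at hu hv
        have h1 : ∀ w : Int, (w = f ch - 1 ∨ ∃ k ∈ [ch], k ≠ ch ∧ f k = w) → w = f ch - 1 := by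
          rintro w (hE | ⟨k, hk, hkch, hkv⟩)
          · exact hE
          · simp at hk; exact absurd hk hkch
        rw [h1 u hu.2, h1 v hv.2]

-- two distinct counts, forward direction: a successful removal at a key of count x
lemma pvC2fwd (S : List Char) (f : Char → Int) (hnd : S.Nodup)
    (x y : Int) (hxy : x ≠ y) (hx1 : 1 ≤ x) (hy1 : 1 ≤ y)
    (hay : ∃ k ∈ S, f k = y)
    (ch : Char) (hch : ch ∈ S) (hfch : f ch = x) (huni : pvUni (pvBlist S f ch)) :
    (x = 1 ∨ x = y + 1) ∧ S.countP (fun k => f k == x) = 1 := by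
  obtain ⟨ky, hky, hkyv⟩ := hay
  have hkych : ky ≠ ch := fun hE => hxy (by rw [← hfch, ← hkyv, hE])
  have hym : y ∈ pvBlist S f ch := by
    rw [pvMemBlist S f ch hch]
    exact ⟨by omega, Or.inr ⟨ky, hky, hkych, hkyv⟩⟩
  have hcx1 : 1 ≤ S.countP (fun k => f k == x) :=
    List.countP_pos_iff.mpr ⟨ch, hch, by simp [hfch]⟩
  by_cases hc2 : 2 ≤ S.countP (fun k => f k == x)
  · obtain ⟨k, hk, hkch, hkv⟩ := pvCntTwo S f x hnd hc2 ch
    have hxm : x ∈ pvBlist S f ch := by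
      rw [pvMemBlist S f ch hch]
      exact ⟨by omega, Or.inr ⟨k, hk, hkch, hkv⟩⟩
    exact absurd (huni x hxm y hym) hxy
  · refine ⟨?_, by omega⟩
    by_cases hx0 : x - 1 ≤ 0
    · left; omega
    · have hm1 : x - 1 ∈ pvBlist S f ch := by
        rw [pvMemBlist S f ch hch]
        exact ⟨by omega, Or.inl (by rw [hfch])⟩
      have := huni (x - 1) hm1 y hym
      right; omega

-- two distinct counts, backward direction: build the successful removal
lemma pvC2bwd (S : List Char) (f : Char → Int)
    (x y : Int) (hall : ∀ k ∈ S, f k = x ∨ f k = y) (hax : ∃ k ∈ S, f k = x)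
    (h : (x = 1 ∨ x = y + 1) ∧ S.countP (fun k => f k == x) = 1) :
    pvBP S f := by
  obtain ⟨hcase, hcx⟩ := h
  obtain ⟨ch, hch, hfch⟩ := hax
  have huniq := pvCntOne S f x ch hch hfch (by omega)
  refine ⟨ch, hch, ?_⟩
  have h1 : ∀ w : Int, 0 < w → (w = f ch - 1 ∨ ∃ k ∈ S, k ≠ ch ∧ f k = w) → w = y := by
    rintro w hw (hE | ⟨k, hk, hkch, hkv⟩)
    · rw [hfch] at hE
      rcases hcase with h1 | h1 <;> omega
    · rcases hall k hk with hv | hv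
      · exact absurd hv (huniq k hk hkch)
      · omega
  intro u hu v hv
  rw [pvMemBlist S f ch hch] at hu hv
  rw [h1 u hu.1 hu.2, h1 v hv.1 hv.2]

-- exactly two distinct counts x and y
lemma pvC2 (S : List Char) (f : Char → Int) (hnd : S.Nodup) (hf : ∀ k ∈ S, 1 ≤ f k)
    (x y : Int) (hF : PySem.Set.ofList (S.map f) = [x, y]) :
    pvBP S f ↔
      ((x = 1 ∧ S.countP (fun k => f k == x) = 1) ∨ (y = 1 ∧ S.countP (fun k => f k == y) = 1) ∨
       (x = y + 1 ∧ S.countP (fun k => f k == x) = 1) ∨ (y = x + 1 ∧ S.countP (fun k => f k == y) = 1)) := by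
  have hnodF := PySem.Set.nodup_ofList (S.map f)
  rw [hF] at hnodF
  have hxy : x ≠ y := by rw [List.nodup_cons] at hnodF; simp at hnodF; tauto
  have hxF : x ∈ PySem.Set.ofList (S.map f) := by rw [hF]; simp
  have hyF : y ∈ PySem.Set.ofList (S.map f) := by rw [hF]; simp
  obtain ⟨kx, hkx, hkxv⟩ := pvAtt S f x hxF
  obtain ⟨ky, hky, hkyv⟩ := pvAtt S f y hyF
  have hx1 : 1 ≤ x := hkxv ▸ hf kx hkx
  have hy1 : 1 ≤ y := hkyv ▸ hf ky hky
  have hall : ∀ k ∈ S, f k = x ∨ f k = y := by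
    intro k hk
    have := pvVal S f k hk
    rw [hF] at this
    simpa using this
  constructor
  · rintro ⟨ch, hch, huni⟩
    rcases hall ch hch with hfch | hfch
    · have := pvC2fwd S f hnd x y hxy hx1 hy1 ⟨ky, hky, hkyv⟩ ch hch hfch huni
      tauto
    · have := pvC2fwd S f hnd y x (Ne.symm hxy) hy1 hx1 ⟨kx, hkx, hkxv⟩ ch hch hfch huni
      tauto
  · intro h
    rcases h with ⟨h1, h2⟩ | ⟨h1, h2⟩ | ⟨h1, h2⟩ | ⟨h1, h2⟩
    · exact pvC2bwd S f x y hall ⟨kx, hkx, hkxv⟩ ⟨Or.inl h1, h2⟩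
    · exact pvC2bwd S f y x (fun k hk => (hall k hk).symm) ⟨ky, hky, hkyv⟩ ⟨Or.inl h1, h2⟩
    · exact pvC2bwd S f x y hall ⟨kx, hkx, hkxv⟩ ⟨Or.inr h1, h2⟩
    · exact pvC2bwd S f y x (fun k hk => (hall k hk).symm) ⟨ky, hky, hkyv⟩ ⟨Or.inr h1, h2⟩

-- evaluation helpers for A's sorted two-element frequency table
lemma pvSorted2Pair (p q : Int × Int) (h : q.1 ≠ p.1) :
    PySem.List.sorted2 [p, q] (fun r => r.1) (fun r => r.2) = if q.1 < p.1 then [q, p] else [p, q] := by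
  by_cases hlt : q.1 < p.1
  · simp [PySem.List.sorted2, PySem.List.insertBy, hlt]
  · simp [PySem.List.sorted2, PySem.List.insertBy, hlt]
    intro h1 h2
    omega

lemma pvSorted2Single (p : Int × Int) :
    PySem.List.sorted2 [p] (fun r => r.1) (fun r => r.2) = [p] := rfl

lemma pvGet0 {α : Type} (a b d : α) : PySem.List.pyGetD [a, b] 0 d = a := by simp [pysem]
lemma pvGet1 {α : Type} (a b d : α) : PySem.List.pyGetD [a, b] 1 d = b := by simp [pysem]
lemma pvGet0s {α : Type} (a d : α) : PySem.List.pyGetD [a] 0 d = a := by simp [pysem]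

lemma pvIf (C : Prop) [Decidable C] :
    ((if C then true else false) = true) ↔ C := by split_ifs <;> simp_all

lemma pvIfIf (C1 C2 : Prop) [Decidable C1] [Decidable C2] :
    ((if C1 then true else if C2 then true else false) = true) ↔ (C1 ∨ C2) := by
  split_ifs <;> simp_all

lemma pvSetNeNil {α : Type} [BEq α] [LawfulBEq α] (cs : List α) (h : cs ≠ []) :
    PySem.Set.ofList cs ≠ [] := by
  match cs, h with
  | c :: t, _ =>
    intro hE
    have : c ∈ PySem.Set.ofList (c :: t) := (PySem.Set.mem_ofList _ _).mpr (by simp)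
    rw [hE] at this; simp at this

lemma pvBshort (code : String) (h : code.toList ≠ []) (hlen : code.toList.length ≤ 3) :
    can_make_balanced_alt code = true := by
  rw [pvB_iff code h]
  have hnd : (PySem.Set.ofList code.toList).Nodup := PySem.Set.nodup_ofList _
  have hSne : PySem.Set.ofList code.toList ≠ [] := pvSetNeNil _ h
  have hmem : ∀ k ∈ PySem.Set.ofList code.toList, k ∈ code.toList :=
    fun k hk => (PySem.Set.mem_ofList _ _).mp hk
  have hpos : ∀ k ∈ PySem.Set.ofList code.toList, 1 ≤ (code.toList.count k : Int) := by
    intro k hk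
    have := List.count_pos_iff.mpr (hmem k hk)
    omega
  have hSlen : (PySem.Set.ofList code.toList).length ≤ 3 :=
    le_trans (PySem.Set.length_ofList_le _) hlen
  have hsum := pvCountsSumLe code.toList _ hnd
  set cs := code.toList with hcs
  set S := PySem.Set.ofList cs with hSdef
  clear_value S
  set f : Char → Int := fun k => (cs.count k : Int) with hfdef
  match S, hSne with
  | [k1], _ =>
    have hc1 : 1 ≤ cs.count k1 := List.count_pos_iff.mpr (hmem k1 (by simp))
    rw [pvC1 [k1] f hnd (by simp) hpos (f k1) (by simp [PySem.Set.ofList])]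
    right; rfl
  | [k1, k2], _ =>
    have hc1 : 1 ≤ cs.count k1 := List.count_pos_iff.mpr (hmem k1 (by simp))
    have hc2 : 1 ≤ cs.count k2 := List.count_pos_iff.mpr (hmem k2 (by simp))
    have hs : cs.count k1 + cs.count k2 ≤ 3 := by
      simp at hsum; omega
    have h12 : k1 ≠ k2 := by rw [List.nodup_cons] at hnd; simp at hnd; tauto
    by_cases heq : cs.count k1 = cs.count k2
    · -- both counts equal, so both 1
      have hcc : cs.count k1 = 1 := by omega
      have hF : PySem.Set.ofList ([k1, k2].map f) = [f k1] := by
        have : f k2 = f k1 := by simp [hfdef, heq]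
        simp [this, PySem.Set.ofList, PySem.Set.add]
      rw [pvC1 [k1, k2] f hnd (by simp) hpos (f k1) hF]
      left; simp [hfdef, hcc]
    · have hne : f k1 ≠ f k2 := by simp [hfdef]; omega
      have hF : PySem.Set.ofList ([k1, k2].map f) = [f k1, f k2] := by
        simp [PySem.Set.ofList, PySem.Set.add, hne.symm]
      rw [pvC2 [k1, k2] f hnd hpos (f k1) (f k2) hF]
      have hcp1 : [k1, k2].countP (fun k => f k == f k1) = 1 := by
        simp [hne.symm]
      have hcp2 : [k1, k2].countP (fun k => f k == f k2) = 1 := by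
        simp [hne]
      by_cases hlt : cs.count k1 = 1
      · left; exact ⟨by simp [hfdef, hlt], hcp1⟩
      · have : cs.count k2 = 1 := by omega
        right; left; exact ⟨by simp [hfdef, this], hcp2⟩
  | [k1, k2, k3], _ =>
    have hc1 : 1 ≤ cs.count k1 := List.count_pos_iff.mpr (hmem k1 (by simp))
    have hc2 : 1 ≤ cs.count k2 := List.count_pos_iff.mpr (hmem k2 (by simp))
    have hc3 : 1 ≤ cs.count k3 := List.count_pos_iff.mpr (hmem k3 (by simp))
    have hs : cs.count k1 + cs.count k2 + cs.count k3 ≤ 3 := by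
      simp at hsum; omega
    have e1 : f k1 = 1 := by simp [hfdef]; omega
    have e2 : f k2 = 1 := by simp [hfdef]; omega
    have e3 : f k3 = 1 := by simp [hfdef]; omega
    have hF : PySem.Set.ofList ([k1, k2, k3].map f) = [1] := by
      simp [e1, e2, e3, PySem.Set.ofList, PySem.Set.add, PySem.Set.contains]
    rw [pvC1 [k1, k2, k3] f hnd (by simp) hpos 1 hF]
    left; rfl
  | k1 :: k2 :: k3 :: k4 :: t, _ =>
    exfalso; simp at hSlen; omega

lemma pvABmain (code : String) (h : code.toList ≠ [])
    (h123 : ¬(code.toList.length = 1 ∨ code.toList.length = 2 ∨ code.toList.length = 3)) :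
    can_make_balanced code = can_make_balanced_alt code := by
  rw [Bool.eq_iff_iff, pvB_iff code h]
  have hnd : (PySem.Set.ofList code.toList).Nodup := PySem.Set.nodup_ofList _
  have hSne : PySem.Set.ofList code.toList ≠ [] := pvSetNeNil _ h
  have hmem : ∀ k ∈ PySem.Set.ofList code.toList, k ∈ code.toList :=
    fun k hk => (PySem.Set.mem_ofList _ _).mp hk
  have hpos : ∀ k ∈ PySem.Set.ofList code.toList, 1 ≤ (code.toList.count k : Int) := by
    intro k hk
    have := List.count_pos_iff.mpr (hmem k hk)
    omega
  unfold can_make_balanced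
  simp only [h, reduceIte, h123]
  rw [pvCountFold_eq code.toList]
  set cs := code.toList with hcs
  set S := PySem.Set.ofList cs with hSdef
  set f : Char → Int := fun k => (cs.count k : Int) with hfdef
  have hv : (PySem.Dict.counter cs).values = S.map f := by
    show ((PySem.Dict.counter cs).items).map (·.2) = S.map f
    rw [PySem.Dict.items_counter, List.map_map]
    rfl
  rw [hv, pvCountFold_eq (S.map f)]
  have hsz : (PySem.Dict.counter (S.map f)).size = (PySem.Set.ofList (S.map f)).length := by
    show (PySem.Dict.counter (S.map f)).items.length = _
    rw [PySem.Dict.items_counter, List.length_map]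
  have hitems := PySem.Dict.items_counter (S.map f)
  have hvalpos : ∀ n ∈ PySem.Set.ofList (S.map f), 1 ≤ n := by
    intro n hn
    rw [PySem.Set.mem_ofList, List.mem_map] at hn
    obtain ⟨k, hk, hkn⟩ := hn
    exact hkn ▸ hpos k hk
  have hvne : S.map f ≠ [] := by
    intro hE; exact hSne (List.map_eq_nil_iff.mp hE)
  have hndF := PySem.Set.nodup_ofList (S.map f)
  rw [hsz, hitems]
  clear_value S
  set F := PySem.Set.ofList (S.map f) with hFdef
  clear_value F
  match F, hndF with
  | [], _ => exact absurd hFdef.symm (pvSetNeNil (S.map f) hvne)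
  | [a], _ =>
    have hcnt : ((S.map f).count a : Int) = (S.length : Int) := by
      have hle : (S.map f).count a = (S.map f).length := by
        rw [List.count_eq_length]
        intro b hb
        have hbF : b ∈ PySem.Set.ofList (S.map f) := (PySem.Set.mem_ofList _ _).mpr hb
        rw [← hFdef] at hbF
        simp at hbF
        omega
      rw [hle, List.length_map]
    simp only [List.map_cons, List.map_nil, List.length_cons, List.length_nil]
    rw [if_neg (by omega), if_neg (by omega)]
    simp only [pvSorted2Single, pvGet0s]
    rw [pvIf, pvC1 S f hnd hSne hpos a hFdef.symm]
    simp only [hcnt]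
    constructor
    · rintro (h1 | h1)
      · exact Or.inl h1
      · right; omega
    · rintro (h1 | h1)
      · exact Or.inl h1
      · right; omega
  | [x, y], hndF2 =>
    have hxy : x ≠ y := by rw [List.nodup_cons] at hndF2; simp at hndF2; tauto
    have hvx : 1 ≤ x := hvalpos x (by simp)
    have hvy : 1 ≤ y := hvalpos y (by simp)
    simp only [List.map_cons, List.map_nil, List.length_cons, List.length_nil]
    rw [if_neg (by omega), if_pos trivial]
    simp only [pvSorted2Pair (x, ((S.map f).count x : Int)) (y, ((S.map f).count y : Int))
      (by simpa using hxy.symm)]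
    by_cases hlt : y < x
    · simp only [if_pos hlt]
      simp only [pvGet0, pvGet1]
      rw [pvIfIf, pvC2 S f hnd hpos x y hFdef.symm, pvCountMap S f x, pvCountMap S f y]
      omega
    · simp only [if_neg hlt]
      simp only [pvGet0, pvGet1]
      rw [pvIfIf, pvC2 S f hnd hpos x y hFdef.symm, pvCountMap S f x, pvCountMap S f y]
      have hyx : y < x ∨ x < y := by omega
      omega
  | x :: y :: z :: t, _ =>
    rw [if_pos (by simp)]
    exact iff_of_false (by simp) (pvC3 S f hnd hpos (by rw [← hFdef]; simp))

-- ===== VERDICT (by name: the statement is the Claim_ definition above) =====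
theorem can_make_balanced_spec : Claim_equal_can_make_balanced := by
  intro code _
  unfold Spec_can_make_balanced
  by_cases hnil : code.toList = []
  · unfold can_make_balanced can_make_balanced_alt
    simp [hnil]
  · by_cases h123 : code.toList.length = 1 ∨ code.toList.length = 2 ∨ code.toList.length = 3
    · have hB := pvBshort code hnil (by omega)
      have h123' : code.length = 1 ∨ code.length = 2 ∨ code.length = 3 := by simpa using h123
      unfold can_make_balanced
      simp [hnil, h123', hB]
    · exact pvABmain code hnil h123
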